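-- pv_equiv track=rewrite | github.com/HeliWang/upstream | DP/sentence-screen-fitting.py | count_sentence
-- ===== SOURCE A (Python) =====
-- def count_sentence(w, h, word_list):
--     """
--     :param w: width
--     :param h: height
--     :param word_list: the list of words in a sentence
--     :return: count of filled sentence
--     """
--     i = 0  # current world of current sentence to put
--     sentence_count = 0
--     for r in range(h):
--         left_w = w
--         while True:
--             word_len = len(word_list[i])
--             # the word is not the first word in the row, add a space before adding the word
--             if left_w != w:
--                 word_len += 1
--             if word_len <= left_w:
--                 left_w -= word_len
--                 i = (i + 1) % len(word_list)
--                 if i == 0: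
--                     sentence_count += 1
--             else:
--                 break
--     return sentence_count
-- ===== SOURCE B (Python) =====
-- def count_sentence(w, h, word_list):
--     """Same result as A, but simulates each distinct row-start index at most
--     once: it records the per-row transition (next index, sentences gained)
--     until a start index repeats, then closes the cycle arithmetically."""
--     if h <= 0:
--         return 0
--     n = len(word_list)
--
--     def row(i):
--         left = w
--         gained = 0
--         while True:
--             need = len(word_list[i]) + (0 if left == w else 1)
--             if left < need:
--                 break
--             left -= need
--             i += 1
--             if i == n:
--                 i = 0
--                 gained += 1
--         return i, gained
--
--     first_seen = {}
--     tots = [0]   # tots[k] = sentences finished after k rows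
--     i = 0
--     r = 0
--     while r < h and i not in first_seen:
--         first_seen[i] = r
--         i, g = row(i)
--         tots.append(tots[-1] + g)
--         r += 1
--     if r == h:
--         return tots[h]
--     r0 = first_seen[i]
--     cycle_len = r - r0
--     cycle_gain = tots[r] - tots[r0]
--     q, s = divmod(h - r0, cycle_len)
--     return tots[r0] + q * cycle_gain + (tots[r0 + s] - tots[r0])
-- ===== Notes on version B (the rewrite author's own statement) =====
-- stated objective: faster
-- what changed: B simulates each distinct row-start index at most once, recording (next index, sentences gained) per row until a start index repeats, then closes the cycle arithmetically, instead of re-scanning the words of every one of the h rows as A does; intended as faster (a timing run measured 6-16x at mid sizes; at the largest sizes, where A times out, the measurement varies by run).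
import Mathlib
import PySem

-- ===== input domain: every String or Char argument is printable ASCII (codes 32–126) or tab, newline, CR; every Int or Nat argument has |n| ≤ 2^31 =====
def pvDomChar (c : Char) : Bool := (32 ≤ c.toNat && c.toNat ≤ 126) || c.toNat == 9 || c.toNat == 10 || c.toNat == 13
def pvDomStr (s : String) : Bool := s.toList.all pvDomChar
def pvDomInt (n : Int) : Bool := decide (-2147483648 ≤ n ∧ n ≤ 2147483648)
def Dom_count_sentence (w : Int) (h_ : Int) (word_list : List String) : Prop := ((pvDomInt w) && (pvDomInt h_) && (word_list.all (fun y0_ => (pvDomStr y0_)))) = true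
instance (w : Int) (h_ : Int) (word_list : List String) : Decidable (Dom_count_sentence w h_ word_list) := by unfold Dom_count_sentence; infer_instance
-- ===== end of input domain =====

-- B simulates each distinct row-start index at most once and closes the repeating cycle
-- arithmetically, where A re-scans the words of every one of the h rows; intended as faster
-- (a timing run measured 6-16x at mid sizes; at the largest sizes A often times out,
-- where the measurement varies by run). Equivalence of the return values on Pre_.

-- ===== PORT A =====
-- the inner `while True` loop; state (left_w, i, sentence_count); fuel only makes the
-- recursion total (it bounds the number of loop steps, which A's loop itself performs)
def csA_inner (word_list : List String) (w : Int) : Nat → (Int × Int × Int) → (Int × Int × Int)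
  | 0, st => st
  | fuel+1, (left_w, i, cnt) =>
    match PySem.List.pyGet? word_list i with
    | none => (left_w, i, cnt)          -- IndexError; excluded by Pre_
    | some word =>
      let word_len : Int := if left_w ≠ w then PySem.Str.len word + 1 else PySem.Str.len word
      if word_len ≤ left_w then
        let i' := PySem.Int.mod (i + 1) (Int.ofNat word_list.length)
        let cnt' := if i' = 0 then cnt + 1 else cnt
        csA_inner word_list w fuel (left_w - word_len, i', cnt')
      else
        (left_w, i, cnt)

def count_sentence (w : Int) (h_ : Int) (word_list : List String) : Int :=
  let fuel := word_list.length + w.toNat + 2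
  let res := (PySem.List.pyRange 0 h_ 1).foldl
    (fun (st : Int × Int) _ =>
      let r := csA_inner word_list w fuel (w, st.1, st.2)
      (r.2.1, r.2.2))
    (0, 0)
  res.2

-- ===== PORT B =====
-- one row simulated from word index i (Source B's inner while loop); returns (next index, sentences gained)
def csB_row (word_list : List String) (w : Int) (n : Nat) : Nat → Int → Int → Int → (Int × Int)
  | 0, i, _left, gained => (i, gained)
  | fuel+1, i, left, gained =>
    match PySem.List.pyGet? word_list i with
    | none => (i, gained)
    | some wd =>
      let need : Int := PySem.Str.len wd + (if left = w then 0 else 1)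
      if left < need then (i, gained)
      else
        let i' := i + 1
        if i' = (n : Int) then csB_row word_list w n fuel 0 (left - need) (gained + 1)
        else csB_row word_list w n fuel i' (left - need) gained

-- the main loop of B: simulate a row per new start index, recording first-seen
-- step numbers and the running totals, until h rows are done or an index repeats
def csB_loop (word_list : List String) (w : Int) (n : Nat) (h_ : Int) :
    Nat → PySem.Dict Int Int → List Int → Int → Int →
      (PySem.Dict Int Int × List Int × Int × Int)
  | 0, seen, tots, i, r => (seen, tots, i, r)
  | f+1, seen, tots, i, r =>
    if r < h_ ∧ seen.get? i = none then
      let p := csB_row word_list w n (n + w.toNat + 2) i w 0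
      csB_loop word_list w n h_ f (seen.insert i r)
        (tots ++ [(PySem.List.pyGet? tots (-1)).getD 0 + p.2]) p.1 (r + 1)
    else (seen, tots, i, r)

def count_sentence_alt (w : Int) (h_ : Int) (word_list : List String) : Int :=
  if h_ ≤ 0 then 0
  else
    let n := word_list.length
    let res := csB_loop word_list w n h_ h_.toNat PySem.Dict.empty [0] 0 0
    let seen := res.1
    let tots := res.2.1
    let i := res.2.2.1
    let r := res.2.2.2
    if r = h_ then (PySem.List.pyGet? tots h_).getD 0
    else
      let r0 := (seen.get? i).getD 0
      let cycleLen := r - r0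
      let cycleGain := (PySem.List.pyGet? tots r).getD 0 - (PySem.List.pyGet? tots r0).getD 0
      -- cycleLen > 0 whenever this branch runs, so divmod? is always `some`
      let qs := (PySem.Int.divmod? (h_ - r0) cycleLen).getD (0, 0)
      (PySem.List.pyGet? tots r0).getD 0 + qs.1 * cycleGain +
        ((PySem.List.pyGet? tots (r0 + qs.2)).getD 0 - (PySem.List.pyGet? tots r0).getD 0)

-- ===== PRECONDITION & SPEC =====
-- Pre_ excludes exactly the inputs where Python A does not return: an empty word_list with
-- h > 0 (IndexError at word_list[0]) and an all-empty word_list with w ≥ 0 and h > 0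
-- (A's inner while-loop never breaks and diverges).
def Pre_count_sentence (w : Int) (h_ : Int) (word_list : List String) : Prop :=
  h_ ≤ 0 ∨ (word_list ≠ [] ∧ (w < 0 ∨ ∃ s ∈ word_list, s ≠ ""))
instance (w : Int) (h_ : Int) (word_list : List String) : Decidable (Pre_count_sentence w h_ word_list) := by unfold Pre_count_sentence; infer_instance

def pvWitness_count_sentence : Int × Int × List String := (6, 3, ["ab", "c"])

def Spec_count_sentence (w : Int) (h_ : Int) (word_list : List String) (out : Int) : Prop := out = count_sentence_alt w h_ word_list
instance (w : Int) (h_ : Int) (word_list : List String) (out : Int) : Decidable (Spec_count_sentence w h_ word_list out) := by unfold Spec_count_sentence; infer_instance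

-- ===== CLAIM (what is proved, stated in full; the proofs are below) =====
def Claim_equal_count_sentence : Prop := ∀ (w : Int) (h_ : Int) (word_list : List String), Dom_count_sentence w h_ word_list → Pre_count_sentence w h_ word_list → Spec_count_sentence w h_ word_list (count_sentence w h_ word_list)

-- ===== LEMMAS AND PROOFS =====

-- gained is a pure accumulator of csB_row
theorem csB_row_gained_shift (word_list : List String) (w : Int) (n : Nat) :
    ∀ fuel (i left g : Int),
      csB_row word_list w n fuel i left g
        = ((csB_row word_list w n fuel i left 0).1, (csB_row word_list w n fuel i left 0).2 + g) := by
  intro fuel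
  induction fuel with
  | zero => intro i left g; simp [csB_row]
  | succ f ih =>
    intro i left g
    simp only [csB_row]
    cases hx : PySem.List.pyGet? word_list i with
    | none => simp
    | some wd =>
      simp only
      set need : Int := PySem.Str.len wd + (if left = w then 0 else 1) with hneeddef
      by_cases h1 : left < need
      · simp [h1]
      · rw [if_neg h1, if_neg h1]
        by_cases h2 : i + 1 = (n : Int)
        · rw [if_pos h2, if_pos h2, ih 0 _ (g+1), ih 0 _ (0+1)]
          simp; ring
        · rw [if_neg h2, if_neg h2, ih (i+1) _ g]

-- one row of A equals one row of B (for an in-range start index)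
theorem row_eq (word_list : List String) (w : Int) (hn : word_list ≠ []) :
    ∀ fuel (i left cnt : Int), 0 ≤ i → i < (word_list.length : Int) →
      (csA_inner word_list w fuel (left, i, cnt)).2
        = ((csB_row word_list w word_list.length fuel i left 0).1,
           cnt + (csB_row word_list w word_list.length fuel i left 0).2) := by
  intro fuel
  induction fuel with
  | zero => intro i left cnt _ _; simp [csA_inner, csB_row]
  | succ f ih =>
    intro i left cnt h0 h1
    have hlen : (0:Int) < (word_list.length : Int) := by
      have := List.length_pos_iff.mpr hn; exact_mod_cast this
    simp only [csA_inner, csB_row]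
    cases hx : PySem.List.pyGet? word_list i with
    | none => simp
    | some wd =>
      simp only
      have hneed : (if left ≠ w then PySem.Str.len wd + 1 else PySem.Str.len wd)
          = PySem.Str.len wd + (if left = w then 0 else 1) := by
        split_ifs <;> simp_all
      rw [hneed]
      set need : Int := PySem.Str.len wd + (if left = w then 0 else 1) with hneeddef
      by_cases hfit : need ≤ left
      · rw [if_pos hfit, if_neg (by omega : ¬ left < need)]
        have hmod : PySem.Int.mod (i + 1) (Int.ofNat word_list.length)
            = if i + 1 = (word_list.length : Int) then 0 else i + 1 := by
          rw [show Int.ofNat word_list.length = (word_list.length : Int) from rfl,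
              PySem.Int.mod_eq_emod_of_pos hlen]
          split_ifs with he
          · simp [he]
          · exact Int.emod_eq_of_lt (by omega) (by omega)
        rw [hmod]
        by_cases he : i + 1 = (word_list.length : Int)
        · simp only [if_pos he]
          simp only [if_true]
          rw [ih 0 _ (cnt+1) (by omega) (by omega),
              csB_row_gained_shift word_list w word_list.length f 0 _ (0+1)]
          refine Prod.ext rfl ?_
          simp; ring
        · simp only [if_neg he]
          rw [if_neg (by omega : ¬ i + 1 = (0:Int)), ih (i+1) _ cnt (by omega) (by omega)]
      · rw [if_neg hfit, if_pos (by omega : left < need)]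
        simp

-- foldl that ignores the list elements = iterate by length
def iterSt (f : Int × Int → Int × Int) : Nat → (Int × Int) → (Int × Int)
  | 0, st => st
  | m+1, st => iterSt f m (f st)

theorem foldl_ignore {α : Type} (f : Int × Int → Int × Int) :
    ∀ (l : List α) (init : Int × Int),
      l.foldl (fun st _ => f st) init = iterSt f l.length init := by
  intro l
  induction l with
  | nil => intro init; simp [iterSt]
  | cons a t ih => intro init; simp [List.foldl, iterSt, ih]

-- the row transition keeps the word index in [0, n)
theorem csB_row_range (word_list : List String) (w : Int) (n : Nat) (hn : 0 < n) :
    ∀ fuel (i left g : Int), 0 ≤ i → i < (n : Int) →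
      0 ≤ (csB_row word_list w n fuel i left g).1 ∧
        (csB_row word_list w n fuel i left g).1 < (n : Int) := by
  intro fuel
  induction fuel with
  | zero => intro i left g h0 h1; simp [csB_row]; omega
  | succ f ih =>
    intro i left g h0 h1
    simp only [csB_row]
    cases hx : PySem.List.pyGet? word_list i with
    | none => simp; omega
    | some wd =>
      simp only
      by_cases hb : left < PySem.Str.len wd + (if left = w then 0 else 1)
      · rw [if_pos hb]; exact ⟨h0, h1⟩
      · rw [if_neg hb]
        by_cases he : i + 1 = (n : Int)
        · rw [if_pos he]; exact ih 0 _ _ (by omega) (by omega)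
        · rw [if_neg he]; exact ih (i+1) _ _ (by omega) (by omega)

-- index after k rows / sentences gained in k rows, starting from word index i
def gI (F : Int → Int × Int) : Nat → Int → Int
  | 0, i => i
  | k+1, i => gI F k (F i).1

def gS (F : Int → Int × Int) : Nat → Int → Int
  | 0, _ => 0
  | k+1, i => (F i).2 + gS F k (F i).1

theorem gI_add (F : Int → Int × Int) : ∀ (a b : Nat) (i : Int),
    gI F (a + b) i = gI F b (gI F a i) := by
  intro a
  induction a with
  | zero => intro b i; simp [gI]
  | succ k ih =>
    intro b i
    have : k + 1 + b = (k + b) + 1 := by omega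
    rw [this]
    show gI F (k + b) (F i).1 = gI F b (gI F k (F i).1)
    exact ih b (F i).1

theorem gS_add (F : Int → Int × Int) : ∀ (a b : Nat) (i : Int),
    gS F (a + b) i = gS F a i + gS F b (gI F a i) := by
  intro a
  induction a with
  | zero => intro b i; simp [gS, gI]
  | succ k ih =>
    intro b i
    have h1 : k + 1 + b = (k + b) + 1 := by omega
    rw [h1]
    show (F i).2 + gS F (k + b) (F i).1
        = ((F i).2 + gS F k (F i).1) + gS F b (gI F (k+1) i)
    rw [ih b (F i).1]
    show (F i).2 + (gS F k (F i).1 + gS F b (gI F k (F i).1))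
        = (F i).2 + gS F k (F i).1 + gS F b (gI F k (F i).1)
    ring

theorem cycle_pow (F : Int → Int × Int) (L : Nat) (j : Int) (hc : gI F L j = j) :
    ∀ q : Nat, gI F (q * L) j = j ∧ gS F (q * L) j = q * gS F L j := by
  intro q
  induction q with
  | zero => simp [gI, gS]
  | succ k ih =>
    have h1 : (k + 1) * L = k * L + L := by ring
    constructor
    · rw [h1, gI_add, ih.1, hc]
    · rw [h1, gS_add, ih.1, ih.2]
      push_cast
      ring

-- A's h rows = gS of A's own transition (shared with B through row_eq)
theorem iterA_eq (word_list : List String) (w : Int) (hn : word_list ≠ []) :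
    ∀ (m : Nat) (st : Int × Int), 0 ≤ st.1 → st.1 < (word_list.length : Int) →
      iterSt (fun st =>
          let r := csA_inner word_list w (word_list.length + w.toNat + 2) (w, st.1, st.2)
          (r.2.1, r.2.2)) m st
        = (gI (fun i => csB_row word_list w word_list.length (word_list.length + w.toNat + 2) i w 0) m st.1,
           st.2 + gS (fun i => csB_row word_list w word_list.length (word_list.length + w.toNat + 2) i w 0) m st.1) := by
  intro m
  induction m with
  | zero => intro st _ _; simp [iterSt, gI, gS]
  | succ k ih =>
    intro st h0 h1
    have hpos : 0 < word_list.length := List.length_pos_iff.mpr hn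
    have hrange := csB_row_range word_list w word_list.length hpos
      (word_list.length + w.toNat + 2) st.1 w 0 h0 h1
    have hstep : (let r := csA_inner word_list w (word_list.length + w.toNat + 2) (w, st.1, st.2)
        (r.2.1, r.2.2))
        = ((csB_row word_list w word_list.length (word_list.length + w.toNat + 2) st.1 w 0).1,
           st.2 + (csB_row word_list w word_list.length (word_list.length + w.toNat + 2) st.1 w 0).2) := by
      simp only
      rw [row_eq word_list w hn _ st.1 w st.2 h0 h1]
    show iterSt _ k _ = _
    beta_reduce
    rw [hstep, ih ((csB_row word_list w word_list.length (word_list.length + w.toNat + 2) st.1 w 0).1,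
          st.2 + (csB_row word_list w word_list.length (word_list.length + w.toNat + 2) st.1 w 0).2)
          hrange.1 hrange.2]
    have hgI : gI (fun i => csB_row word_list w word_list.length (word_list.length + w.toNat + 2) i w 0) (k+1) st.1
        = gI (fun i => csB_row word_list w word_list.length (word_list.length + w.toNat + 2) i w 0) k
            (csB_row word_list w word_list.length (word_list.length + w.toNat + 2) st.1 w 0).1 := rfl
    have hgS : gS (fun i => csB_row word_list w word_list.length (word_list.length + w.toNat + 2) i w 0) (k+1) st.1
        = (csB_row word_list w word_list.length (word_list.length + w.toNat + 2) st.1 w 0).2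
          + gS (fun i => csB_row word_list w word_list.length (word_list.length + w.toNat + 2) i w 0) k
            (csB_row word_list w word_list.length (word_list.length + w.toNat + 2) st.1 w 0).1 := rfl
    rw [hgI, hgS]
    refine Prod.ext rfl ?_
    simp
    ring

-- everything csB_loop maintains; F is B's row transition
theorem loop_inv (word_list : List String) (w : Int) (h_ : Int)
    (F : Int → Int × Int)
    (hF : F = fun i => csB_row word_list w word_list.length (word_list.length + w.toNat + 2) i w 0) :
    ∀ (f : Nat) (seen : PySem.Dict Int Int) (tots : List Int) (i r : Int),
      0 ≤ r → (f : Int) = h_ - r →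
      tots = (List.range (r.toNat + 1)).map (fun k => gS F k 0) →
      i = gI F r.toNat 0 →
      (∀ x k, seen.get? x = some k → 0 ≤ k ∧ k < r ∧ gI F k.toNat 0 = x) →
      (let res := csB_loop word_list w word_list.length h_ f seen tots i r
       (res.2.2.2 = h_ ∨ (res.2.2.2 < h_ ∧ ∃ r0, res.1.get? res.2.2.1 = some r0 ∧
          0 ≤ r0 ∧ r0 < res.2.2.2 ∧ gI F r0.toNat 0 = res.2.2.1))
       ∧ 0 ≤ res.2.2.2 ∧ res.2.2.2 ≤ h_
       ∧ res.2.1 = (List.range (res.2.2.2.toNat + 1)).map (fun k => gS F k 0)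
       ∧ res.2.2.1 = gI F res.2.2.2.toNat 0) := by
  intro f
  induction f with
  | zero =>
    intro seen tots i r hr hfuel htots hi hseen
    simp only [csB_loop]
    have : r = h_ := by exact_mod_cast by omega
    exact ⟨Or.inl this, hr, le_of_eq this, htots, hi⟩
  | succ f ih =>
    intro seen tots i r hr hfuel htots hi hseen
    have hrlt : r < h_ := by
      have : ((f + 1 : Nat) : Int) = h_ - r := hfuel
      omega
    simp only [csB_loop]
    by_cases hc : r < h_ ∧ seen.get? i = none
    · rw [if_pos hc]
      have hlast : (PySem.List.pyGet? tots (-1)).getD 0 = gS F r.toNat 0 := by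
        rw [PySem.List.pyGet?_neg_one, htots]
        rw [List.getLast?_eq_getElem?]
        simp
      have htots' : tots ++ [(PySem.List.pyGet? tots (-1)).getD 0
            + (csB_row word_list w word_list.length (word_list.length + w.toNat + 2) i w 0).2]
          = (List.range ((r+1).toNat + 1)).map (fun k => gS F k 0) := by
        have hrt : (r+1).toNat + 1 = (r.toNat + 1) + 1 := by omega
        rw [hrt, List.range_succ, List.map_append, ← htots, hlast]
        congr 1
        have : gS F (r.toNat + 1) 0 = gS F r.toNat 0 + gS F 1 (gI F r.toNat 0) := gS_add F r.toNat 1 0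
        simp only [List.map_cons, List.map_nil]
        congr 1
        rw [this, hi, hF]
        simp [gS]
      have hi' : (csB_row word_list w word_list.length (word_list.length + w.toNat + 2) i w 0).1
          = gI F (r+1).toNat 0 := by
        have hrt : (r+1).toNat = r.toNat + 1 := by omega
        rw [hrt, gI_add F r.toNat 1 0, ← hi, hF]
        rfl
      have hseen' : ∀ x k, (seen.insert i r).get? x = some k →
          0 ≤ k ∧ k < r + 1 ∧ gI F k.toNat 0 = x := by
        intro x k hx
        rw [PySem.Dict.get?_insert] at hx
        by_cases hxi : x = i
        · rw [if_pos hxi] at hx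
          cases hx
          exact ⟨hr, by omega, by rw [← hi, hxi]⟩
        · rw [if_neg hxi] at hx
          obtain ⟨a, b, c⟩ := hseen x k hx
          exact ⟨a, by omega, c⟩
      have := ih (seen.insert i r)
        (tots ++ [(PySem.List.pyGet? tots (-1)).getD 0
          + (csB_row word_list w word_list.length (word_list.length + w.toNat + 2) i w 0).2])
        (csB_row word_list w word_list.length (word_list.length + w.toNat + 2) i w 0).1 (r+1)
        (by omega) (by omega) htots' hi' hseen'
      exact this
    · rw [if_neg hc]
      have hsome : ∃ r0, seen.get? i = some r0 := by
        rcases Option.eq_none_or_eq_some (seen.get? i) with h | h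
        · exact absurd ⟨hrlt, h⟩ hc
        · exact h
      obtain ⟨r0, hr0⟩ := hsome
      obtain ⟨a, b, c⟩ := hseen i r0 hr0
      exact ⟨Or.inr ⟨hrlt, r0, hr0, a, b, c⟩, hr, le_of_lt hrlt, htots, hi⟩

-- reading an entry of the recorded totals
theorem tots_get (F : Int → Int × Int) (rr : Int) (k : Int) (h0 : 0 ≤ k) (h1 : k ≤ rr) (hr : 0 ≤ rr) :
    (PySem.List.pyGet? ((List.range (rr.toNat + 1)).map (fun k => gS F k 0)) k).getD 0
      = gS F k.toNat 0 := by
  rw [PySem.List.pyGet?_of_nonneg _ h0, List.getElem?_map]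
  rw [List.getElem?_range (by omega : k.toNat < rr.toNat + 1)]
  rfl

-- ===== VERDICT (by name: the statement is the Claim_ definition above) =====
theorem count_sentence_spec : Claim_equal_count_sentence := by
  intro w h_ word_list _hdom hpre
  unfold Spec_count_sentence
  by_cases hh : h_ ≤ 0
  · simp only [count_sentence, count_sentence_alt, if_pos hh]
    rw [PySem.List.pyRange_one_eq_nil (by omega)]
    rfl
  · have hn : word_list ≠ [] := by
      rcases hpre with h | ⟨h, _⟩
      · omega
      · exact h
    have hpos : 0 < word_list.length := List.length_pos_iff.mpr hn
    set F : Int → Int × Int :=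
      fun i => csB_row word_list w word_list.length (word_list.length + w.toNat + 2) i w 0 with hF
    -- A's side: gS F h_.toNat 0
    have hA : count_sentence w h_ word_list = gS F h_.toNat 0 := by
      simp only [count_sentence]
      rw [foldl_ignore]
      rw [PySem.List.length_pyRange_one]
      have : (h_ - 0).toNat = h_.toNat := by omega
      rw [this, iterA_eq word_list w hn h_.toNat (0, 0) le_rfl
            (by show (0:Int) < (word_list.length : Int); exact_mod_cast hpos)]
      simp only [← hF]
      omega
    rw [hA]
    -- B's side
    simp only [count_sentence_alt, if_neg hh]
    have hinv := loop_inv word_list w h_ F hF h_.toNat PySem.Dict.empty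
      ((List.range (0 + 1)).map (fun k => gS F k 0)) 0 0 le_rfl (by omega)
      rfl rfl (by intro x k hx; simp [PySem.Dict.get?_empty] at hx)
    have hstart : (List.range (0 + 1)).map (fun k => gS F k 0) = [0] := by
      simp [gS]
    rw [hstart] at hinv
    set res := csB_loop word_list w word_list.length h_ h_.toNat PySem.Dict.empty [0] 0 0 with hres
    obtain ⟨hexit, hr0, hrh, htots, hi⟩ := hinv
    rcases hexit with heq | ⟨hlt, r0, hget, hr00, hr0lt, hgI⟩
    · rw [if_pos heq]
      rw [htots, tots_get F res.2.2.2 h_ (by omega) (by omega) hr0]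
    · rw [if_neg (by omega)]
      rw [hget]
      simp only [Option.getD_some]
      set rr := res.2.2.2 with hrr
      have hL : 0 < rr - r0 := by omega
      have hdm : (PySem.Int.divmod? (h_ - r0) (rr - r0)).getD (0, 0)
          = (PySem.Int.floordiv (h_ - r0) (rr - r0), PySem.Int.mod (h_ - r0) (rr - r0)) := by
        simp only [PySem.Int.divmod?]
        rw [if_neg (by omega : ¬ rr - r0 = 0)]
        rfl
      rw [htots, hdm]
      set q := PySem.Int.floordiv (h_ - r0) (rr - r0) with hq
      set ss := PySem.Int.mod (h_ - r0) (rr - r0) with hs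
      have hs0 : 0 ≤ ss := PySem.Int.mod_nonneg _ hL
      have hsL : ss < rr - r0 := PySem.Int.mod_lt _ hL
      have hqe : q * (rr - r0) + ss = h_ - r0 := PySem.Int.floordiv_mul_add_mod _ _
      have hq0 : 0 ≤ q := by
        by_contra hneg
        push_neg at hneg
        nlinarith
      simp only
      rw [tots_get F rr r0 hr00 (by omega) (by omega),
          tots_get F rr rr (by omega) le_rfl (by omega),
          tots_get F rr (r0 + ss) (by omega) (by omega) (by omega)]
      -- the periodic-sum identity
      set j := gI F r0.toNat 0 with hj
      have hij : res.2.2.1 = j := hgI.symm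
      set L' : Nat := rr.toNat - r0.toNat with hL'
      have hcyc : gI F L' j = j := by
        have h2 : gI F rr.toNat 0 = gI F L' (gI F r0.toNat 0) := by
          rw [show rr.toNat = r0.toNat + L' by omega, gI_add]
        rw [← hj] at h2
        rw [← h2, ← hi, hij]
      have hqcast : ((q.toNat : Nat) : Int) = q := by omega
      have hLcast : ((L' : Nat) : Int) = rr - r0 := by omega
      have hscast : ((ss.toNat : Nat) : Int) = ss := by omega
      have key : (q.toNat : Int) * ((L' : Nat) : Int) = h_ - r0 - ss := by
        rw [hqcast, hLcast]
        linarith [hqe]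
      have hsplit : h_.toNat = r0.toNat + (q.toNat * L' + ss.toNat) := by omega
      have e1 : gS F h_.toNat 0
          = gS F r0.toNat 0 + gS F (q.toNat * L' + ss.toNat) j := by
        rw [hsplit, gS_add, hj]
      have e2 : gS F (q.toNat * L' + ss.toNat) j
          = (q.toNat : Int) * gS F L' j + gS F ss.toNat j := by
        rw [gS_add, (cycle_pow F _ j hcyc q.toNat).1, (cycle_pow F _ j hcyc q.toNat).2]
      have e3 : gS F L' j = gS F rr.toNat 0 - gS F r0.toNat 0 := by
        have h1 : rr.toNat = r0.toNat + L' := by omega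
        have hadd := gS_add F r0.toNat L' 0
        rw [← h1, ← hj] at hadd
        omega
      have e4 : gS F ss.toNat j = gS F (r0 + ss).toNat 0 - gS F r0.toNat 0 := by
        have h1 : (r0 + ss).toNat = r0.toNat + ss.toNat := by omega
        have hadd := gS_add F r0.toNat ss.toNat 0
        rw [← hj] at hadd
        rw [h1, hadd]
        omega
      rw [e1, e2, e3, e4, hqcast]
      ring
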